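-- pv_equiv track=rewrite | github.com/theonlypal/getswiftapi-void-eval | eval/run_openai.py | parse_controls
-- ===== SOURCE A (Python) =====
-- def parse_controls(raw: str) -> list[tuple[str, str]]:
--     out = []
--     current_name = None
--     current_lines = []
--
--     for line in raw.splitlines():
--         if line.startswith("[") and line.endswith("]"):
--             if current_name is not None:
--                 out.append((current_name, "\n".join(current_lines).strip()))
--             current_name = line[1:-1]
--             current_lines = []
--         else:
--             current_lines.append(line)
--
--     if current_name is not None:
--         out.append((current_name, "\n".join(current_lines).strip()))
--     return out
-- ===== SOURCE B (Python) =====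
-- def parse_controls(raw: str) -> list[tuple[str, str]]:
--     lines = raw.splitlines()
--     headers = [(i, line[1:-1]) for i, line in enumerate(lines)
--                if line.startswith("[") and line.endswith("]")]
--     out = []
--     for k, (idx, name) in enumerate(headers):
--         nxt = headers[k + 1][0] if k + 1 < len(headers) else len(lines)
--         out.append((name, "\n".join(lines[idx + 1:nxt]).strip()))
--     return out
-- ===== Notes on version B (the rewrite author's own statement) =====
-- stated objective: alternative
-- what changed: Replaces A's single flush-at-boundary loop with running accumulator state (current_name, current_lines) by a two-pass decomposition: first build the table of (index, name) headers via enumerate, then slice each section's content span lines[idx+1:nxt] between consecutive headers.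
import Mathlib
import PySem

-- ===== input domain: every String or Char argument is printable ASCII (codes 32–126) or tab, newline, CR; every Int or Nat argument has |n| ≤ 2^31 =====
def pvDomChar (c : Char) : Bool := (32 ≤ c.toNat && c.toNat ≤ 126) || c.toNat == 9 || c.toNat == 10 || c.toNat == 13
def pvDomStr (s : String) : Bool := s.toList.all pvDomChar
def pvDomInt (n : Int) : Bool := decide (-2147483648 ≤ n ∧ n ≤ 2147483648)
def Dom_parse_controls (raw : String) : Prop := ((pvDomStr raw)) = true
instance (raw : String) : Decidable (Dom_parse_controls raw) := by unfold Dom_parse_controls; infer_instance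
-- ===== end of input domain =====

-- B changes the decomposition: it precomputes the table of section headers and slices each
-- section's span from the line list, instead of A's running flush-at-boundary accumulator
-- (objective: alternative; same cost).


-- shared one-liners both Pythons contain verbatim:
-- line.startswith("[") and line.endswith("]");  line[1:-1];  "\n".join(ls).strip()
def pvHdr (l : String) : Bool := PySem.Str.startswith l "[" && PySem.Str.endswith l "]"
def pvName (l : String) : String := PySem.Str.slice l (some 1) (some (-1))
def pvMk (ls : List String) : String := PySem.Str.strip (PySem.Str.join "\n" ls)

-- ===== PORT A =====
-- A's for-loop over splitlines with state (current_name, current_lines, out)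
def pvLoopA : List String → Option String → List String → List (String × String) → List (String × String)
  | [], cur, cls, out =>
      match cur with
      | none => out
      | some n => out ++ [(n, pvMk cls)]
  | l :: rest, cur, cls, out =>
      if pvHdr l then
        pvLoopA rest (some (pvName l)) []
          (match cur with
           | none => out
           | some n => out ++ [(n, pvMk cls)])
      else
        pvLoopA rest cur (cls ++ [l]) out

def parse_controls (raw : String) : List (String × String) :=
  pvLoopA (PySem.Str.splitlines raw) none [] []

-- ===== PORT B =====
-- B's second pass: for each header (idx, name), content = lines[idx+1:nxt]
def pvGo (lines : List String) : List (Int × String) → List (String × String)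
  | [] => []
  | (i, n) :: rest =>
      let nxt : Int := match rest with
        | [] => (lines.length : Int)
        | (j, _) :: _ => j
      (n, pvMk (PySem.List.slice lines (some (i + 1)) (some nxt))) :: pvGo lines rest

def parse_controls_alt (raw : String) : List (String × String) :=
  let lines := PySem.Str.splitlines raw
  let headers := ((PySem.List.enumerate lines 0).filter (fun p => pvHdr p.2)).map
    (fun p => (p.1, pvName p.2))
  pvGo lines headers

-- ===== PRECONDITION & SPEC =====
def Spec_parse_controls (raw : String) (out : List (String × String)) : Prop := out = parse_controls_alt raw
instance (raw : String) (out : List (String × String)) : Decidable (Spec_parse_controls raw out) := by unfold Spec_parse_controls; infer_instance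

-- ===== CLAIM (what is proved, stated in full; the proofs are below) =====
def Claim_equal_parse_controls : Prop := ∀ (raw : String), Dom_parse_controls raw → Spec_parse_controls raw (parse_controls raw)

-- ===== LEMMAS AND PROOFS =====

-- B's header table starting at index s
def pvH (s : Int) (lines : List String) : List (Int × String) :=
  ((PySem.List.enumerate lines s).filter (fun p => pvHdr p.2)).map (fun p => (p.1, pvName p.2))

lemma pvH_nil (s : Int) : pvH s [] = [] := rfl

lemma pvH_cons (s : Int) (l : String) (rest : List String) :
    pvH s (l :: rest) =
      if pvHdr l then (s, pvName l) :: pvH (s + 1) rest else pvH (s + 1) rest := by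
  simp only [pvH, PySem.List.enumerate_cons, List.filter_cons]
  split_ifs with h
  · simp
  · simp

lemma take_findIdx_eq_takeWhile (p : String → Bool) (xs : List String) :
    xs.take (xs.findIdx p) = xs.takeWhile (fun l => !p l) := by
  induction xs with
  | nil => rfl
  | cons x xs ih =>
      by_cases h : p x
      · simp [List.findIdx_cons, h]
      · simp [List.findIdx_cons, h, ih]

-- the first header of pvH ↑t rest sits at index t + findIdx pvHdr rest
lemma pvH_first (rest : List String) : ∀ (t : Nat),
    (pvH (t : Int) rest = [] ∧ rest.findIdx pvHdr = rest.length) ∨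
    (∃ n hs, pvH (t : Int) rest = (((t + rest.findIdx pvHdr : Nat) : Int), n) :: hs) := by
  induction rest with
  | nil => intro t; left; simp [pvH_nil]
  | cons l rest ih =>
      intro t
      by_cases h : pvHdr l
      · right
        refine ⟨pvName l, pvH ((t : Int) + 1) rest, ?_⟩
        simp [pvH_cons, h, List.findIdx_cons]
      · have := ih (t + 1)
        rw [pvH_cons]
        simp only [h]
        rcases this with ⟨h1, h2⟩ | ⟨n, hs, h1⟩
        · left
          constructor
          · simpa using h1
          · simp [List.findIdx_cons, h, h2]
        · right
          refine ⟨n, hs, ?_⟩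
          have : ((t : Int) + 1) = ((t + 1 : Nat) : Int) := by push_cast; ring
          rw [this, h1]
          simp [List.findIdx_cons, h]
          omega

-- key slice fact: the span B slices for a header at s is exactly the lines A accumulates
lemma slice_span (L : List String) (s : Nat) (hs : s + 1 ≤ L.length) :
    PySem.List.slice L (some ((s : Int) + 1))
        (some (match pvH ((s : Int) + 1) (L.drop (s + 1)) with
               | [] => (L.length : Int)
               | (j, _) :: _ => j)) =
      (L.drop (s + 1)).takeWhile (fun l => !pvHdr l) := by
  set rest := L.drop (s + 1) with hrest
  have hlen : rest.length = L.length - (s + 1) := by simp [hrest]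
  have hcast : ((s : Int) + 1) = ((s + 1 : Nat) : Int) := by push_cast; ring
  rcases pvH_first rest (s + 1) with ⟨h1, h2⟩ | ⟨n, hs', h1⟩
  · rw [hcast, h1]
    have hL : (L.length : Int) = ((s + 1 : Nat) : Int) + ((rest.length : Nat) : Int) := by
      push_cast; omega
    rw [hL, PySem.List.slice_natCast_add, ← hrest]
    rw [← h2, take_findIdx_eq_takeWhile]
  · rw [hcast, h1]
    have : (((s + 1) + rest.findIdx pvHdr : Nat) : Int)
        = ((s + 1 : Nat) : Int) + ((rest.findIdx pvHdr : Nat) : Int) := by push_cast; ring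
    rw [this, PySem.List.slice_natCast_add, ← hrest, take_findIdx_eq_takeWhile]

-- main invariant: A's loop over the suffix L.drop s equals B's pvGo over the header table,
-- with a pending section (some n, cls) producing cls ++ (lines up to the next header)
lemma pvMain (lines : List String) : ∀ (L : List String) (s : Nat),
    s ≤ L.length → L.drop s = lines →
    ((∀ out cls, pvLoopA lines none cls out = out ++ pvGo L (pvH (s : Int) lines)) ∧
     (∀ out n cls, pvLoopA lines (some n) cls out =
        out ++ (n, pvMk (cls ++ lines.takeWhile (fun l => !pvHdr l))) ::
          pvGo L (pvH (s : Int) lines))) := by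
  induction lines with
  | nil =>
      intro L s _ _
      constructor
      · intro out cls; simp [pvLoopA, pvH_nil, pvGo]
      · intro out n cls; simp [pvLoopA, pvH_nil, pvGo]
  | cons l rest ih =>
      intro L s hsle hdrop
      have hlen : rest.length = L.length - (s + 1) := by
        have := congrArg List.length hdrop
        simp at this; omega
      have hs1 : s + 1 ≤ L.length := by
        have := congrArg List.length hdrop
        simp at this; omega
      have hdrop' : L.drop (s + 1) = rest := by
        have h1 : (L.drop s).drop 1 = rest := by rw [hdrop]; simp
        rw [← h1, List.drop_drop, Nat.add_comm]
      have IH := ih L (s + 1) hs1 hdrop'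
      by_cases h : pvHdr l
      · -- header line: A flushes / starts a section, B's table gains (s, name l)
        have hcast : ((s + 1 : Nat) : Int) = (s : Int) + 1 := by push_cast; ring
        have hGo : pvGo L (pvH (s : Int) (l :: rest)) =
            (pvName l, pvMk (rest.takeWhile (fun l => !pvHdr l))) ::
              pvGo L (pvH ((s : Int) + 1) rest) := by
          rw [pvH_cons]
          simp only [h, if_true, pvGo]
          have := slice_span L s hs1
          rw [hdrop'] at this
          rw [this]
        constructor
        · intro out cls
          simp only [pvLoopA, h, if_true]
          rw [(IH.2) out (pvName l) [], hGo]
          simp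
        · intro out n cls
          simp only [pvLoopA, h, if_true]
          rw [(IH.2) (out ++ [(n, pvMk cls)]) (pvName l) [], hGo]
          have hTW : (l :: rest).takeWhile (fun l => !pvHdr l) = [] := by
            simp [h]
          rw [hTW]
          simp
      · -- plain line
        have hH : pvH (s : Int) (l :: rest) = pvH ((s : Int) + 1) rest := by
          rw [pvH_cons]; simp [h]
        have hcast : ((s + 1 : Nat) : Int) = (s : Int) + 1 := by push_cast; ring
        constructor
        · intro out cls
          simp only [pvLoopA, h, Bool.false_eq_true, if_false]
          rw [(IH.1) out (cls ++ [l]), hH, hcast]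
        · intro out n cls
          simp only [pvLoopA, h, Bool.false_eq_true, if_false]
          rw [(IH.2) out n (cls ++ [l]), hH, hcast]
          have : (cls ++ [l]) ++ rest.takeWhile (fun l => !pvHdr l)
              = cls ++ (l :: rest).takeWhile (fun l => !pvHdr l) := by
            simp [h]
          rw [this]

-- ===== VERDICT (by name: the statement is the Claim_ definition above) =====
theorem parse_controls_spec : Claim_equal_parse_controls := by
  intro raw _
  unfold Spec_parse_controls parse_controls parse_controls_alt
  have := (pvMain (PySem.Str.splitlines raw) (PySem.Str.splitlines raw) 0 (by omega) (by simp)).1 [] []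
  simpa [pvH] using this
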